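-- pv_equiv track=rewrite | github.com/AlifSrSE/ProblemSolves | 1178B-wowFactor.py | alif
-- ===== SOURCE A (Python) =====
-- def alif(s):
--     n = len(s)
--     left_w_counts = [0] * n
--     left_w_count = 0
--     for i in range(n):
--         if i > 0 and s[i] == 'v' and s[i - 1] == 'v':
--             left_w_count += 1
--         left_w_counts[i] = left_w_count
--
--     right_w_counts = [0] * n
--     right_w_count = 0
--     for i in range(n - 1, -1, -1):
--         if i < n - 1 and s[i] == 'v' and s[i + 1] == 'v':
--             right_w_count += 1
--         right_w_counts[i] = right_w_count
--
--     return sum(left_w_counts[i] * right_w_counts[i] for i in range(n) if s[i] == 'o')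
-- ===== SOURCE B (Python) =====
-- def alif(s):
--     # One forward pass: a = completed 'vv' pairs so far, b = sum of a over 'o's seen,
--     # c = answer accumulated at each completed pair.
--     a = b = c = 0
--     prev = ''
--     for ch in s:
--         if ch == 'v' and prev == 'v':
--             c += b
--             a += 1
--         elif ch == 'o':
--             b += a
--         prev = ch
--     return c
-- ===== Notes on version B (the rewrite author's own statement) =====
-- stated objective: faster
-- what changed: Replaced A's three passes (prefix pair-count array, suffix pair-count array, then a summation over 'o' positions) with a single forward pass keeping three rolling integer counters (completed vv pairs, vv-o pairs, vv-o-vv triples) in O(1) extra space.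
import Mathlib
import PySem

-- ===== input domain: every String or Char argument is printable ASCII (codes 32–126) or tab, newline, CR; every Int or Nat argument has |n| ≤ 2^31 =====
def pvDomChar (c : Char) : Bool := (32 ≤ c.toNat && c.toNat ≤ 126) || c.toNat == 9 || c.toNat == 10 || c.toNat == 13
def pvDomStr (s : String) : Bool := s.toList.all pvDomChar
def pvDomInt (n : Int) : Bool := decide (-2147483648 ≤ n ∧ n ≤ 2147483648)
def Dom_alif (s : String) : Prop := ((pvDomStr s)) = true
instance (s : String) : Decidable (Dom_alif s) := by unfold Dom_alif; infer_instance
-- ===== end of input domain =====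

-- B replaces A's prefix array + suffix array + summation pass with a single forward
-- pass keeping three rolling counters (pairs, pair·o, pair·o·pair); objective: faster (one pass, O(1) space).

-- ===== PORT A =====
def alif (s : String) : Int :=
  let cs := s.toList
  let n : Int := (cs.length : Int)
  -- left loop: left_w_counts[i] = running count of completed 'vv' pairs ending ≤ i
  let lst :=
    (PySem.List.pyRange 0 n 1).foldl
      (fun (st : List Int × Int) i =>
        let c := if 0 < i ∧ PySem.List.pyGet? cs i = some 'v' ∧ PySem.List.pyGet? cs (i - 1) = some 'v'
                 then st.2 + 1 else st.2
        (PySem.List.pySetD st.1 i c, c))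
      (List.replicate cs.length 0, 0)
  let lefts := lst.1
  -- right loop: right_w_counts[i] = running count of 'vv' pairs starting ≥ i
  let rst :=
    (PySem.List.pyRange (n - 1) (-1) (-1)).foldl
      (fun (st : List Int × Int) i =>
        let c := if i < n - 1 ∧ PySem.List.pyGet? cs i = some 'v' ∧ PySem.List.pyGet? cs (i + 1) = some 'v'
                 then st.2 + 1 else st.2
        (PySem.List.pySetD st.1 i c, c))
      (List.replicate cs.length 0, 0)
  let rights := rst.1
  -- sum over the 'o' positions (indices in range are always valid: default 0 is never read)
  (PySem.List.pyRange 0 n 1).foldl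
    (fun acc i =>
      if PySem.List.pyGet? cs i = some 'o'
      then acc + PySem.List.pyGetD lefts i 0 * PySem.List.pyGetD rights i 0
      else acc)
    0

-- ===== PORT B =====
def alif_alt (s : String) : Int :=
  let st :=
    s.toList.foldl
      (fun (st : Int × Int × Int × Option Char) ch =>
        let (a, b, c, _prev) := st
        if ch = 'v' ∧ _prev = some 'v' then (a + 1, b, c + b, some ch)
        else if ch = 'o' then (a, b + a, c, some ch)
        else (a, b, c, some ch))
      (0, 0, 0, none)
  st.2.2.1

-- ===== PRECONDITION & SPEC =====
def Spec_alif (s : String) (out : Int) : Prop := out = alif_alt s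
instance (s : String) (out : Int) : Decidable (Spec_alif s out) := by unfold Spec_alif; infer_instance

-- ===== CLAIM (what is proved, stated in full; the proofs are below) =====
def Claim_equal_alif : Prop := ∀ (s : String), Dom_alif s → Spec_alif s (alif s)

-- ===== LEMMAS AND PROOFS =====

def pairAt (cs : List Char) (i : Nat) : Bool :=
  decide (1 ≤ i) && (cs.getD (i - 1) 'x' == 'v') && (cs.getD i 'x' == 'v')
def pcount (cs : List Char) (m : Nat) : Int :=
  ((List.range m).countP (pairAt cs) : Int)
def oterm (cs : List Char) (i : Nat) : Int :=
  if cs.getD i 'x' = 'o'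
  then pcount cs (i + 1) * (pcount cs cs.length - pcount cs (i + 1))
  else 0

theorem pairAt_of_ge (cs : List Char) (i : Nat) (h : cs.length ≤ i) : pairAt cs i = false := by
  simp [pairAt, List.getD_eq_getElem?_getD, List.getElem?_eq_none h]

theorem pcount_succ (cs : List Char) (m : Nat) :
    pcount cs (m + 1) = pcount cs m + (if pairAt cs m then 1 else 0) := by
  simp [pcount, List.range_succ, List.countP_append, List.countP_cons]

theorem pcount_len_succ (cs : List Char) :
    pcount cs (cs.length + 1) = pcount cs cs.length := by
  simp [pcount_succ, pairAt_of_ge cs cs.length le_rfl]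

def bstep (st : Int × Int × Int × Option Char) (ch : Char) : Int × Int × Int × Option Char :=
  let (a, b, c, _prev) := st
  if ch = 'v' ∧ _prev = some 'v' then (a + 1, b, c + b, some ch)
  else if ch = 'o' then (a, b + a, c, some ch)
  else (a, b, c, some ch)

theorem altInv (cs : List Char) (t : List Char) :
    ∀ (p : List Char), cs = p ++ t →
    ∀ (a b c : Int) (prev : Option Char),
      a = pcount cs p.length →
      ((prev = some 'v') ↔ (1 ≤ p.length ∧ cs.getD (p.length - 1) 'x' = 'v')) →
      (t.foldl bstep (a, b, c, prev)).2.2.1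
        = c + b * (pcount cs cs.length - pcount cs p.length)
          + ((List.range' p.length t.length).map (oterm cs)).sum := by
  induction t with
  | nil =>
    intro p h a b c prev ha hprev
    have : p.length = cs.length := by simp [h]
    simp [this]
  | cons ch t' ih =>
    intro p h a b c prev ha hprev
    have hm0 : cs[p.length]? = some ch := by
      simp [h]
    have hm : cs.getD p.length 'x' = ch := by
      simp [List.getD_eq_getElem?_getD, hm0]
    have hprev' : ((some ch : Option Char) = some 'v') ↔
        (1 ≤ p.length + 1 ∧ cs.getD (p.length + 1 - 1) 'x' = 'v') := by
      rw [Nat.add_sub_cancel, hm]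
      simp
    have h' : cs = (p ++ [ch]) ++ t' := by simp [h]
    have hlen' : (p ++ [ch]).length = p.length + 1 := by simp
    have hpair : pairAt cs p.length = true ↔ (ch = 'v' ∧ prev = some 'v') := by
      simp only [pairAt, Bool.and_eq_true, decide_eq_true_eq, beq_iff_eq, hm]
      constructor
      · rintro ⟨⟨h1, h2⟩, h3⟩
        exact ⟨h3, hprev.2 ⟨h1, h2⟩⟩
      · rintro ⟨h3, hpv⟩
        exact ⟨hprev.1 hpv, h3⟩
    rw [List.foldl_cons]
    by_cases hc : ch = 'v' ∧ prev = some 'v'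
    · have hp : pairAt cs p.length = true := hpair.2 hc
      have hstep : bstep (a, b, c, prev) ch = (a + 1, b, c + b, some ch) := by
        simp [bstep, hc]
      rw [hstep, ih (p ++ [ch]) h' (a + 1) b (c + b) (some ch)
            (by rw [hlen', pcount_succ, hp, ← ha]; simp) (by rw [hlen']; exact hprev')]
      simp only [hlen', List.length_cons, List.range'_succ, List.map_cons, List.sum_cons]
      have ho : oterm cs p.length = 0 := by
        unfold oterm
        rw [hm, hc.1]
        simp
      rw [ho, pcount_succ, hp]
      simp only [if_true]
      ring
    · have hp : pairAt cs p.length = false := by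
        rw [← Bool.not_eq_true]; exact fun hh => hc (hpair.1 hh)
      have hpc : pcount cs (p.length + 1) = pcount cs p.length := by
        rw [pcount_succ, hp]; simp
      by_cases ho : ch = 'o'
      · have hstep : bstep (a, b, c, prev) ch = (a, b + a, c, some ch) := by
          simp only [bstep]
          rw [if_neg hc, if_pos ho]
        rw [hstep, ih (p ++ [ch]) h' a (b + a) c (some ch)
              (by rw [hlen', hpc]; exact ha) (by rw [hlen']; exact hprev')]
        simp only [hlen', List.length_cons, List.range'_succ, List.map_cons, List.sum_cons]
        have hot : oterm cs p.length = a * (pcount cs cs.length - pcount cs p.length) := by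
          unfold oterm
          rw [hm, if_pos ho, hpc, ha]
        rw [hot, hpc]
        ring
      · have hstep : bstep (a, b, c, prev) ch = (a, b, c, some ch) := by
          simp only [bstep]
          rw [if_neg hc, if_neg ho]
        rw [hstep, ih (p ++ [ch]) h' a b c (some ch)
              (by rw [hlen', hpc]; exact ha) (by rw [hlen']; exact hprev')]
        simp only [hlen', List.length_cons, List.range'_succ, List.map_cons, List.sum_cons]
        have hot : oterm cs p.length = 0 := by
          unfold oterm
          rw [hm, if_neg ho]
        rw [hot, hpc]
        ring

theorem alt_eq_sum (s : String) :
    alif_alt s = ((List.range' 0 s.toList.length).map (oterm s.toList)).sum := by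
  have h := altInv s.toList s.toList [] rfl 0 0 0 none (by simp [pcount]) (by simp)
  simpa using h

def natStepL (cs : List Char) (st : List Int × Int) (k : Nat) : List Int × Int :=
  let c := if pairAt cs k then st.2 + 1 else st.2
  (st.1.set k c, c)

def natStepR (cs : List Char) (st : List Int × Int) (j : Nat) : List Int × Int :=
  let c := if pairAt cs (j + 1) then st.2 + 1 else st.2
  (st.1.set j c, c)

theorem left_fold_eq (cs : List Char) :
    (PySem.List.pyRange 0 (cs.length : Int) 1).foldl
      (fun (st : List Int × Int) i =>
        let c := if 0 < i ∧ PySem.List.pyGet? cs i = some 'v' ∧ PySem.List.pyGet? cs (i - 1) = some 'v'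
                 then st.2 + 1 else st.2
        (PySem.List.pySetD st.1 i c, c))
      (List.replicate cs.length 0, 0)
    = (List.range cs.length).foldl (natStepL cs) (List.replicate cs.length 0, 0) := by
  rw [PySem.List.pyRange_one, List.foldl_map]
  have hn : ((cs.length : Int) - 0).toNat = cs.length := by omega
  rw [hn]
  apply PySem.List.foldl_congr_mem
  intro st k hk
  rw [List.mem_range] at hk
  have hcond : (0 < (0 + (k:Int)) ∧ PySem.List.pyGet? cs (0 + (k:Int)) = some 'v'
      ∧ PySem.List.pyGet? cs (0 + (k:Int) - 1) = some 'v') ↔ (pairAt cs k = true) := by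
    cases k with
    | zero => simp [pairAt]
    | succ k' =>
      have h1 : (0 : Int) + ((k' + 1 : Nat) : Int) - 1 = ((k' : Nat) : Int) := by push_cast; ring
      have h2 : (0 : Int) + ((k' + 1 : Nat) : Int) = ((k' + 1 : Nat) : Int) := by ring
      rw [h1, h2, PySem.List.pyGet?_natCast, PySem.List.pyGet?_natCast]
      have hk1 : k' < cs.length := by omega
      rw [List.getElem?_eq_getElem hk, List.getElem?_eq_getElem hk1]
      simp [pairAt, List.getD_eq_getElem?_getD, hk, hk1]
      exact and_comm
  simp only [natStepL, zero_add, PySem.List.pySetD_natCast] at *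
  rw [if_congr hcond rfl rfl]

theorem leftInv (cs : List Char) : ∀ m, m ≤ cs.length →
    (List.range m).foldl (natStepL cs) (List.replicate cs.length 0, 0)
      = ((List.range cs.length).map (fun j => if j < m then pcount cs (j + 1) else 0),
         pcount cs m) := by
  intro m
  induction m with
  | zero =>
    intro _
    simp [pcount, List.map_const']
  | succ m ih =>
    intro hm
    rw [List.range_succ, List.foldl_append, ih (by omega), List.foldl_cons, List.foldl_nil]
    have hc : (if pairAt cs m then pcount cs m + 1 else pcount cs m) = pcount cs (m + 1) := by
      rw [pcount_succ]; split_ifs <;> ring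
    simp only [natStepL, hc]
    refine Prod.ext ?_ rfl
    apply List.ext_getElem
    · simp
    · intro i h1 h2
      simp only [List.getElem_set, List.getElem_map, List.getElem_range] at *
      rcases Nat.lt_trichotomy i m with h | h | h
      · rw [if_neg (by omega), if_pos h, if_pos (by omega)]
      · subst h
        rw [if_pos rfl, if_pos (by omega)]
      · rw [if_neg (by omega), if_neg (by omega), if_neg (by omega)]

theorem right_fold_eq (cs : List Char) :
    (PySem.List.pyRange ((cs.length : Int) - 1) (-1) (-1)).foldl
      (fun (st : List Int × Int) i =>
        let c := if i < (cs.length : Int) - 1 ∧ PySem.List.pyGet? cs i = some 'v'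
                    ∧ PySem.List.pyGet? cs (i + 1) = some 'v'
                 then st.2 + 1 else st.2
        (PySem.List.pySetD st.1 i c, c))
      (List.replicate cs.length 0, 0)
    = (List.range cs.length).foldl (fun st k => natStepR cs st (cs.length - 1 - k))
        (List.replicate cs.length 0, 0) := by
  rw [PySem.List.pyRange_neg_one, List.foldl_map]
  have hn : ((cs.length : Int) - 1 - (-1)).toNat = cs.length := by omega
  rw [hn]
  apply PySem.List.foldl_congr_mem
  intro st k hk
  rw [List.mem_range] at hk
  have hj : (cs.length : Int) - 1 - (k : Int) = ((cs.length - 1 - k : Nat) : Int) := by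
    omega
  set j : Nat := cs.length - 1 - k with hjdef
  have hjlt : j < cs.length := by omega
  have hcond : (((cs.length : Int) - 1 - (k : Int)) < (cs.length : Int) - 1
      ∧ PySem.List.pyGet? cs ((cs.length : Int) - 1 - (k : Int)) = some 'v'
      ∧ PySem.List.pyGet? cs ((cs.length : Int) - 1 - (k : Int) + 1) = some 'v')
      ↔ (pairAt cs (j + 1) = true) := by
    rw [hj]
    have hj1 : ((j : Nat) : Int) + 1 = ((j + 1 : Nat) : Int) := by push_cast; ring
    rw [hj1, PySem.List.pyGet?_natCast, PySem.List.pyGet?_natCast]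
    by_cases hend : j + 1 < cs.length
    · rw [List.getElem?_eq_getElem hjlt, List.getElem?_eq_getElem hend]
      have h1 : ((cs.length - 1 - k : Nat) : Int) < (cs.length : Int) - 1 := by omega
      simp [pairAt, List.getD_eq_getElem?_getD, hjlt, hend]
      intro _ _
      omega
    · have hje : j + 1 = cs.length := by omega
      have h2 : cs[j + 1]? = none := by
        rw [List.getElem?_eq_none_iff]; omega
      simp [pairAt, List.getD_eq_getElem?_getD, h2]
  simp only [natStepR]
  rw [if_congr hcond rfl rfl, hj, PySem.List.pySetD_natCast]

theorem rightInv (cs : List Char) : ∀ m, m ≤ cs.length →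
    (List.range m).foldl (fun st k => natStepR cs st (cs.length - 1 - k))
        (List.replicate cs.length 0, 0)
      = ((List.range cs.length).map
           (fun j => if cs.length - m ≤ j then pcount cs cs.length - pcount cs (j + 1) else 0),
         pcount cs cs.length - pcount cs (cs.length - m + 1)) := by
  intro m
  induction m with
  | zero =>
    intro _
    rw [Nat.sub_zero, pcount_len_succ]
    simp only [List.range_zero, List.foldl_nil, sub_self]
    refine Prod.ext ?_ rfl
    refine (List.ext_getElem (by simp) ?_).symm
    intro i h1 h2
    simp only [List.getElem_map, List.getElem_range, List.getElem_replicate] at *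
    rw [if_neg (by simp at h1; omega)]
  | succ m ih =>
    intro hm
    rw [List.range_succ, List.foldl_append, ih (by omega), List.foldl_cons, List.foldl_nil]
    have hj1 : cs.length - 1 - m + 1 = cs.length - m := by omega
    have hc : (if pairAt cs (cs.length - m)
          then pcount cs cs.length - pcount cs (cs.length - m + 1) + 1
          else pcount cs cs.length - pcount cs (cs.length - m + 1))
        = pcount cs cs.length - pcount cs (cs.length - (m + 1) + 1) := by
      have h2 : cs.length - (m + 1) + 1 = cs.length - m := by omega
      rw [h2, pcount_succ (cs := cs) (m := cs.length - m)]
      split_ifs <;> ring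
    simp only [natStepR, hj1, hc]
    refine Prod.ext ?_ rfl
    apply List.ext_getElem
    · simp
    · intro i hA hB
      simp only [List.getElem_set, List.getElem_map, List.getElem_range] at *
      simp only [List.length_set, List.length_map, List.length_range] at hA
      rcases Nat.lt_trichotomy i (cs.length - 1 - m) with h | h | h
      · rw [if_neg (by omega), if_neg (by omega), if_neg (by omega)]
      · rw [if_pos h.symm, if_pos (by omega)]
        have he : cs.length - (m + 1) + 1 = i + 1 := by omega
        rw [he]
      · rw [if_neg (by omega), if_pos (by omega), if_pos (by omega)]

theorem alif_eq_sum (s : String) :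
    alif s = ((List.range s.toList.length).map (oterm s.toList)).sum := by
  simp only [alif]
  rw [left_fold_eq, leftInv s.toList s.toList.length le_rfl,
      right_fold_eq, rightInv s.toList s.toList.length le_rfl]
  rw [PySem.List.pyRange_one, List.foldl_map]
  have hn : ((s.toList.length : Int) - 0).toNat = s.toList.length := by omega
  rw [hn]
  rw [PySem.List.foldl_congr_mem _ _ (fun acc k => acc + oterm s.toList k) 0 ?_]
  · rw [PySem.List.foldl_add, zero_add]
  · intro acc k hk
    rw [List.mem_range] at hk
    simp only [zero_add, PySem.List.pyGet?_natCast, PySem.List.pyGetD_natCast,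
      List.getElem?_eq_getElem hk]
    rw [PySem.List.getD_map_range _ _ _ _ hk, PySem.List.getD_map_range _ _ _ _ hk]
    rw [if_pos hk, if_pos (by omega : s.toList.length - s.toList.length ≤ k)]
    unfold oterm
    rw [List.getD_eq_getElem s.toList 'x' hk]
    by_cases hko : s.toList[k] = 'o'
    · rw [if_pos (by rw [hko]), if_pos hko]
    · rw [if_neg (fun hh => hko (by simpa using hh)), if_neg hko]
      ring

theorem alif_spec : Claim_equal_alif := by
  intro s _
  unfold Spec_alif
  rw [alif_eq_sum, alt_eq_sum, List.range_eq_range']
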